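-- pv_equiv track=rewrite | github.com/isb-cgc/ISB-CGC-data-proc | tcga_etl_pipeline/maf/part2/check_duplicates.py | select_aliquots
-- ===== SOURCE A (Python) =====
-- from collections import OrderedDict
--
-- def select_aliquots(duplicate_aliquots):
--
--     d = OrderedDict([
--                       ('13:15', ['10'])
--                     , ('19:20', ['D'])
--                     , ('26:28', ['01', '08', '14', '09', '21', '30', '10', '12', '13', '31', '18', '25'])
--                    ])
--
--     for k, v in d.items():
--         ki = k.strip().split(':')
--
--         for y in v:
--             aliquots_to_be_deleted = []
--             for x in duplicate_aliquots:
--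
-- #         for y in v:
--                 string = str(x[int(ki[0]):int(ki[1])])
--             #print string, str(y)
--                 if string == str(y):
--                     aliquots_to_be_deleted.append(x)
--             if len(aliquots_to_be_deleted) == 1:
--                 return aliquots_to_be_deleted[0]
--             else:
--                 continue
--
--     # return default aliqout
--     default_aliquot = duplicate_aliquots[0]
--     try:
--         plate_ids = [int(x[21:25]) for x in duplicate_aliquots]
--         plate_ids = sorted(plate_ids, reverse=True)
--         default_aliquot = [x for x in duplicate_aliquots if str(plate_ids[0]) in x][0]
--     except:
--         pass
--     return default_aliquot
-- ===== SOURCE B (Python) =====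
-- def select_aliquots(duplicate_aliquots):
--     patterns = [
--         ((13, 15), ['10']),
--         ((19, 20), ['D']),
--         ((26, 28), ['01', '08', '14', '09', '21', '30', '10', '12', '13', '31', '18', '25']),
--     ]
--     for (a, b), vals in patterns:
--         groups = {}
--         for x in duplicate_aliquots:
--             groups.setdefault(x[a:b], []).append(x)
--         for y in vals:
--             g = groups.get(y, [])
--             if len(g) == 1:
--                 return g[0]
--     default_aliquot = duplicate_aliquots[0]
--     try:
--         top = max(int(x[21:25]) for x in duplicate_aliquots)
--         default_aliquot = next(x for x in duplicate_aliquots if str(top) in x)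
--     except Exception:
--         pass
--     return default_aliquot
-- ===== Notes on version B (the rewrite author's own statement) =====
-- stated objective: faster
-- what changed: Per pattern key B makes one grouping pass building a dict substring -> matching aliquots and answers each of the key's candidate values by a constant-time lookup, removing A's full rescan of the list for every candidate value; the plate-id fallback takes max() with next() over a generator instead of reverse-sorting and double comprehensions.
import Mathlib
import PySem

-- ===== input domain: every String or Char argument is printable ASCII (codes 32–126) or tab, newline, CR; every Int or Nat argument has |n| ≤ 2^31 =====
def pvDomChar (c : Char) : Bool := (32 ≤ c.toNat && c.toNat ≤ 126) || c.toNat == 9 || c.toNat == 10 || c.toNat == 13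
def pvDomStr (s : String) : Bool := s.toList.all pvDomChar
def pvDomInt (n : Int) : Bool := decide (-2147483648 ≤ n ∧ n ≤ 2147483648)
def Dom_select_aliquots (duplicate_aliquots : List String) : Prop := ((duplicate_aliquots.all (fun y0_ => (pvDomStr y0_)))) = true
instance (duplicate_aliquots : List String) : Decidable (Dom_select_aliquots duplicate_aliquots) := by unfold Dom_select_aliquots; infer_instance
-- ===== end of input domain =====

-- B restructures the pattern search: one grouping pass per key into a dict substring -> aliquots
-- with constant-time candidate lookups, and a max()/next() fallback instead of reverse-sort + comprehensions.

-- ===== PORT A =====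
-- inner 'for y in v' loop: build aliquots_to_be_deleted by scanning duplicate_aliquots, return it if it has exactly one element
def pvA_yloop (a b : Int) (vals : List String) (xs : List String) : Option String :=
  match vals with
  | [] => none
  | y :: ys =>
    let mtchs := xs.foldl (fun acc x =>
      if PySem.Str.slice x (some a) (some b) == y then acc ++ [x] else acc) []
    if mtchs.length == 1 then mtchs.head? else pvA_yloop a b ys xs

-- outer 'for k, v in d.items()' loop: parse 'a:b' from the key, then the y-loop
-- (int(ki[0]) / int(ki[1]) never raise on the literal keys, so the .getD defaults are never used)
def pvA_keyloop (items : List (String × List String)) (xs : List String) : Option String :=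
  match items with
  | [] => none
  | (k, v) :: rest =>
    let ki := (PySem.Str.split? (PySem.Str.strip k) ":").getD []  -- sep ":" ≠ "", never none
    let a := (PySem.Int.ofStr? (List.getD ki 0 "")).getD 0
    let b := (PySem.Int.ofStr? (List.getD ki 1 "")).getD 0
    match pvA_yloop a b v xs with
    | some r => some r
    | none => pvA_keyloop rest xs

def select_aliquots (duplicate_aliquots : List String) : String :=
  match pvA_keyloop [("13:15", ["10"]), ("19:20", ["D"]),
      ("26:28", ["01", "08", "14", "09", "21", "30", "10", "12", "13", "31", "18", "25"])]
      duplicate_aliquots with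
  | some r => r
  | none =>
    -- default_aliquot = duplicate_aliquots[0]; raises IndexError on [] (excluded by Pre_)
    let default_aliquot := duplicate_aliquots.headD ""
    -- try: any failure in the comprehension / indexing falls back to default_aliquot
    match duplicate_aliquots.mapM (fun x => PySem.Int.ofStr? (PySem.Str.slice x (some 21) (some 25))) with
    | none => default_aliquot
    | some plate_ids =>
      match PySem.List.sorted plate_ids (fun z => z) true with
      | [] => default_aliquot
      | p :: _ =>
        match (duplicate_aliquots.filter (fun x => PySem.Str.isIn (PySem.Int.toStr p) x)).head? with
        | none => default_aliquot
        | some r => r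

-- ===== PORT B =====
-- groups.setdefault(x[a:b], []).append(x), one pass over the list
def pvB_groups (a b : Int) (xs : List String) : PySem.Dict String (List String) :=
  xs.foldl (fun d x => d.modify (PySem.Str.slice x (some a) (some b)) [] (fun l => l ++ [x]))
    PySem.Dict.empty

-- 'for y in vals': constant-time lookup of each candidate in the prebuilt groups
def pvB_lookup (groups : PySem.Dict String (List String)) (vals : List String) : Option String :=
  match vals with
  | [] => none
  | y :: ys =>
    let g := groups.getD y []
    if g.length == 1 then g.head? else pvB_lookup groups ys

def pvB_keyloop (pats : List ((Int × Int) × List String)) (xs : List String) : Option String :=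
  match pats with
  | [] => none
  | ((a, b), vals) :: rest =>
    match pvB_lookup (pvB_groups a b xs) vals with
    | some r => some r
    | none => pvB_keyloop rest xs

def select_aliquots_alt (duplicate_aliquots : List String) : String :=
  match pvB_keyloop [((13, 15), ["10"]), ((19, 20), ["D"]),
      ((26, 28), ["01", "08", "14", "09", "21", "30", "10", "12", "13", "31", "18", "25"])]
      duplicate_aliquots with
  | some r => r
  | none =>
    let default_aliquot := duplicate_aliquots.headD ""
    match duplicate_aliquots.mapM (fun x => PySem.Int.ofStr? (PySem.Str.slice x (some 21) (some 25))) with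
    | none => default_aliquot
    | some plate_ids =>
      match PySem.List.max? plate_ids (fun z => z) with
      | none => default_aliquot
      | some top =>
        match duplicate_aliquots.find? (fun x => PySem.Str.isIn (PySem.Int.toStr top) x) with
        | none => default_aliquot
        | some r => r

-- ===== PRECONDITION & SPEC =====
-- Pre_ excludes only the empty list, on which Python A raises IndexError at duplicate_aliquots[0].
def Pre_select_aliquots (duplicate_aliquots : List String) : Prop := duplicate_aliquots ≠ []
instance (duplicate_aliquots : List String) : Decidable (Pre_select_aliquots duplicate_aliquots) := by unfold Pre_select_aliquots; infer_instance
def pvWitness_select_aliquots : List String := ["TCGA-02-0001-01C-01D-0182-01"]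
def Spec_select_aliquots (duplicate_aliquots : List String) (out : String) : Prop := out = select_aliquots_alt duplicate_aliquots
instance (duplicate_aliquots : List String) (out : String) : Decidable (Spec_select_aliquots duplicate_aliquots out) := by unfold Spec_select_aliquots; infer_instance

-- ===== CLAIM (what is proved, stated in full; the proofs are below) =====
def Claim_equal_select_aliquots : Prop := ∀ (duplicate_aliquots : List String), Dom_select_aliquots duplicate_aliquots → Pre_select_aliquots duplicate_aliquots → Spec_select_aliquots duplicate_aliquots (select_aliquots duplicate_aliquots)

-- ===== LEMMAS AND PROOFS =====

-- the grouping dict characterised: looking up y gives exactly the filter A's inner scan builds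
theorem pvB_groups_getD (a b : Int) (xs : List String) (d0 : PySem.Dict String (List String)) (y : String) :
    (xs.foldl (fun d x => d.modify (PySem.Str.slice x (some a) (some b)) [] (fun l => l ++ [x])) d0).getD y []
      = d0.getD y [] ++ xs.filter (fun x => PySem.Str.slice x (some a) (some b) == y) := by
  induction xs generalizing d0 with
  | nil => simp
  | cons x t ih =>
    simp only [List.foldl_cons, List.filter_cons, ih]
    by_cases h : PySem.Str.slice x (some a) (some b) = y
    · subst h
      rw [PySem.Dict.getD_modify_self]
      simp
    · rw [PySem.Dict.getD_modify_of_ne _ _ _ (Ne.symm h)]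
      simp [h]

theorem pvB_lookup_eq (a b : Int) (vals xs : List String) :
    pvB_lookup (pvB_groups a b xs) vals = pvA_yloop a b vals xs := by
  induction vals with
  | nil => rfl
  | cons y ys ih =>
    simp only [pvB_lookup, pvA_yloop, ih]
    have hg : (pvB_groups a b xs).getD y []
        = xs.filter (fun x => PySem.Str.slice x (some a) (some b) == y) := by
      have := pvB_groups_getD a b xs PySem.Dict.empty y
      simpa [pvB_groups] using this
    have hf : xs.foldl (fun acc x =>
        if PySem.Str.slice x (some a) (some b) == y then acc ++ [x] else acc) ([] : List String)
        = xs.filter (fun x => PySem.Str.slice x (some a) (some b) == y) := by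
      simpa using PySem.List.foldl_append_if
        (fun x => PySem.Str.slice x (some a) (some b) == y) (fun x => x) xs []
    rw [hg, hf]

-- head of the reverse-sorted plate ids equals max()
theorem pv_sorted_rev_head_eq_max (pids : List Int) (p : Int) (t : List Int)
    (h : PySem.List.sorted pids (fun z => z) true = p :: t) :
    PySem.List.max? pids (fun z => z) = some p := by
  have hne : pids ≠ [] := by
    intro h0
    have h9 : PySem.List.sorted pids (fun z => z) true = [] :=
      (PySem.List.sorted_eq_nil_iff _ _ _).mpr h0
    rw [h] at h9
    exact List.cons_ne_nil _ _ h9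
  obtain ⟨m, hm⟩ : ∃ m, PySem.List.max? pids (fun z => z) = some m := by
    cases hmax : PySem.List.max? pids (fun z => z) with
    | none => exact absurd ((PySem.List.max?_eq_none_iff _ _).mp hmax) hne
    | some m => exact ⟨m, rfl⟩
  have hpm : p ∈ pids := by
    have : p ∈ PySem.List.sorted pids (fun z => z) true := by rw [h]; exact List.mem_cons_self
    exact (PySem.List.mem_sorted _ _ _ _).mp this
  have h1 : p ≤ m := PySem.List.max?_isMax hm p hpm
  have h2 : m ≤ p := PySem.List.key_head_sorted_rev_ge pids (fun z => z) h m (PySem.List.max?_mem hm)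
  rw [hm, le_antisymm h2 h1]

theorem select_aliquots_spec : Claim_equal_select_aliquots := by
  intro xs _ _
  unfold Spec_select_aliquots select_aliquots select_aliquots_alt
  have e1 : (PySem.Int.ofStr? (List.getD ((PySem.Str.split? (PySem.Str.strip "13:15") ":").getD []) 0 "")).getD 0 = (13:Int) := by decide
  have e2 : (PySem.Int.ofStr? (List.getD ((PySem.Str.split? (PySem.Str.strip "13:15") ":").getD []) 1 "")).getD 0 = (15:Int) := by decide
  have e3 : (PySem.Int.ofStr? (List.getD ((PySem.Str.split? (PySem.Str.strip "19:20") ":").getD []) 0 "")).getD 0 = (19:Int) := by decide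
  have e4 : (PySem.Int.ofStr? (List.getD ((PySem.Str.split? (PySem.Str.strip "19:20") ":").getD []) 1 "")).getD 0 = (20:Int) := by decide
  have e5 : (PySem.Int.ofStr? (List.getD ((PySem.Str.split? (PySem.Str.strip "26:28") ":").getD []) 0 "")).getD 0 = (26:Int) := by decide
  have e6 : (PySem.Int.ofStr? (List.getD ((PySem.Str.split? (PySem.Str.strip "26:28") ":").getD []) 1 "")).getD 0 = (28:Int) := by decide
  simp only [pvA_keyloop, pvB_keyloop, e1, e2, e3, e4, e5, e6, pvB_lookup_eq]
  cases hK1 : pvA_yloop 13 15 ["10"] xs with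
  | some r => rfl
  | none =>
  cases hK2 : pvA_yloop 19 20 ["D"] xs with
  | some r => rfl
  | none =>
  cases hK3 : pvA_yloop 26 28 ["01", "08", "14", "09", "21", "30", "10", "12", "13", "31", "18", "25"] xs with
  | some r => rfl
  | none =>
  simp only []
  cases hM : xs.mapM (fun x => PySem.Int.ofStr? (PySem.Str.slice x (some 21) (some 25))) with
  | none => rfl
  | some pids =>
  simp only []
  cases hS : PySem.List.sorted pids (fun z => z) true with
  | nil =>
    have h0 : pids = [] := (PySem.List.sorted_eq_nil_iff _ _ _).mp hS
    subst h0
    have : PySem.List.max? ([] : List Int) (fun z => z) = none :=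
      (PySem.List.max?_eq_none_iff _ _).mpr rfl
    rw [this]
  | cons p t =>
    rw [pv_sorted_rev_head_eq_max pids p t hS]
    simp only [List.head?_filter]
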